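-- pv_equiv track=rewrite | github.com/EugenHaidarli/Proiect-de-an | timsort.py | colors
-- ===== SOURCE A (Python) =====
-- def colors(length, left, middle, right):
--     colors_list = []
--
--     for i in range(length):
--         if i >= left and i <= right:
--             if i >= left and i <= middle:
--                 colors_list.append("#FFD700")
--             else:
--                 colors_list.append("#FF1493")
--         else:
--             colors_list.append("#FFFFF0")
--
--     return colors_list
-- ===== SOURCE B (Python) =====
-- def colors(length, left, middle, right):
--     colors_list = ["#FFFFF0"] * length
--     lo = max(0, left)
--     hi = min(length - 1, right)
--     if lo <= hi:
--         colors_list[lo:hi + 1] = ["#FF1493"] * (hi - lo + 1)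
--         gm = min(hi, middle)
--         if lo <= gm:
--             colors_list[lo:gm + 1] = ["#FFD700"] * (gm - lo + 1)
--     return colors_list
-- ===== Notes on version B (the rewrite author's own statement) =====
-- stated objective: simpler
-- what changed: Instead of classifying each index inside a loop, B builds the ivory default list at once and overwrites the clamped pink slice and then the gold sub-slice with slice assignment (build-default-then-paint-ranges).
import Mathlib
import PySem

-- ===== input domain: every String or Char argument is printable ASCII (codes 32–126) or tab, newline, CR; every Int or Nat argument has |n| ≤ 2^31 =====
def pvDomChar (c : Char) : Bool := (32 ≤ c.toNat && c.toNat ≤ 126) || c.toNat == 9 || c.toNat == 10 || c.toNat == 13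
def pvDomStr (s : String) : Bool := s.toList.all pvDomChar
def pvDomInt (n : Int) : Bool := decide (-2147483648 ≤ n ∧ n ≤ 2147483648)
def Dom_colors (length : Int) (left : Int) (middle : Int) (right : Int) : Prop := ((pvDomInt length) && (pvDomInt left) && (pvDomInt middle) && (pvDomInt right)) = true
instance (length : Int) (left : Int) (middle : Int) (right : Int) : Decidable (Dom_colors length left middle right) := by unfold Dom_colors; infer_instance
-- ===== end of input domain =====

-- B builds the ivory default list once and paints the clamped pink range and the gold sub-range
-- over it (slice assignment) instead of classifying every index in a loop; same cost, simpler.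

-- ===== PORT A =====
def colors (length : Int) (left : Int) (middle : Int) (right : Int) : List String :=
  (PySem.List.pyRange 0 length 1).foldl (fun colors_list i =>
    if left ≤ i ∧ i ≤ right then
      if left ≤ i ∧ i ≤ middle then colors_list ++ ["#FFD700"]
      else colors_list ++ ["#FF1493"]
    else colors_list ++ ["#FFFFF0"]) []

-- ===== PORT B =====
-- slice assignment xs[lo:hi+1] = [c]*(hi-lo+1); exact here since the guards ensure 0 ≤ lo ≤ hi < len xs,
-- so the replacement list has exactly the length of the removed slice
def pvPaint (xs : List String) (lo hi : Int) (c : String) : List String :=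
  xs.take lo.toNat ++ List.replicate (hi - lo + 1).toNat c ++ xs.drop (hi + 1).toNat

def colors_alt (length : Int) (left : Int) (middle : Int) (right : Int) : List String :=
  let base := List.replicate length.toNat "#FFFFF0"
  let lo := max 0 left
  let hi := min (length - 1) right
  if lo ≤ hi then
    let pink := pvPaint base lo hi "#FF1493"
    let gm := min hi middle
    if lo ≤ gm then pvPaint pink lo gm "#FFD700" else pink
  else base

-- ===== PRECONDITION & SPEC =====
def Spec_colors (length : Int) (left : Int) (middle : Int) (right : Int) (out : List String) : Prop := out = colors_alt length left middle right
instance (length : Int) (left : Int) (middle : Int) (right : Int) (out : List String) : Decidable (Spec_colors length left middle right out) := by unfold Spec_colors; infer_instance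

-- ===== CLAIM (what is proved, stated in full; the proofs are below) =====
def Claim_equal_colors : Prop := ∀ (length : Int) (left : Int) (middle : Int) (right : Int), Dom_colors length left middle right → Spec_colors length left middle right (colors length left middle right)

-- ===== LEMMAS AND PROOFS =====

theorem foldl_snoc_eq_map {α β : Type} (f : α → β) (l : List α) (init : List β) :
    l.foldl (fun acc i => acc ++ [f i]) init = init ++ l.map f := by
  induction l generalizing init with
  | nil => simp
  | cons a t ih => simp [List.foldl_cons, ih]

theorem colors_eq_map (length left middle right : Int) :
    colors length left middle right =
      (List.range length.toNat).map (fun (k : Nat) =>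
        if left ≤ (k : Int) ∧ (k : Int) ≤ right then
          if left ≤ (k : Int) ∧ (k : Int) ≤ middle then "#FFD700" else "#FF1493"
        else "#FFFFF0") := by
  unfold colors
  have h : (fun (colors_list : List String) (i : Int) =>
      if left ≤ i ∧ i ≤ right then
        if left ≤ i ∧ i ≤ middle then colors_list ++ ["#FFD700"]
        else colors_list ++ ["#FF1493"]
      else colors_list ++ ["#FFFFF0"]) =
      (fun colors_list i => colors_list ++ [if left ≤ i ∧ i ≤ right then
        (if left ≤ i ∧ i ≤ middle then "#FFD700" else "#FF1493") else "#FFFFF0"]) := by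
    funext acc i; split_ifs <;> rfl
  rw [h, foldl_snoc_eq_map, PySem.List.pyRange_one, List.map_map]
  simp only [List.nil_append, Int.sub_zero]
  apply List.map_congr_left
  intro k _
  simp

theorem pvPaint_length (xs : List String) (lo hi : Int) (c : String)
    (h0 : 0 ≤ lo) (hlh : lo ≤ hi) (hhi : hi < (xs.length : Int)) :
    (pvPaint xs lo hi c).length = xs.length := by
  unfold pvPaint
  simp only [List.length_append, List.length_take, List.length_replicate, List.length_drop]
  omega

theorem pvPaint_getElem (xs : List String) (lo hi : Int) (c : String)
    (h0 : 0 ≤ lo) (hlh : lo ≤ hi) (hhi : hi < (xs.length : Int))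
    (i : Nat) (hi' : i < xs.length) (hx : i < (pvPaint xs lo hi c).length) :
    (pvPaint xs lo hi c)[i] = if lo ≤ (i : Int) ∧ (i : Int) ≤ hi then c else xs[i] := by
  simp only [pvPaint] at hx ⊢
  by_cases h1 : (i : Int) < lo
  · rw [List.getElem_append_left (by simp only [List.length_append, List.length_take]; omega)]
    rw [List.getElem_append_left (by simp only [List.length_take]; omega)]
    rw [List.getElem_take]
    rw [if_neg (by omega)]
  · by_cases h2 : (i : Int) ≤ hi
    · rw [List.getElem_append_left (by simp only [List.length_append, List.length_take, List.length_replicate]; omega)]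
      rw [List.getElem_append_right (by simp only [List.length_take]; omega)]
      rw [List.getElem_replicate, if_pos (by omega)]
    · rw [List.getElem_append_right (by simp only [List.length_append, List.length_take, List.length_replicate]; omega)]
      rw [List.getElem_drop]
      rw [if_neg (by omega)]
      congr 1
      simp only [List.length_append, List.length_take, List.length_replicate]
      omega

-- ===== VERDICT (by name: the statement is the Claim_ definition above) =====
theorem colors_spec : Claim_equal_colors := by
  unfold Claim_equal_colors Spec_colors
  intro length left middle right _
  rw [colors_eq_map]
  unfold colors_alt
  dsimp only
  have hbl : (List.replicate length.toNat "#FFFFF0").length = length.toNat := List.length_replicate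
  split_ifs with hph hg
  · -- pink and gold painted
    have h0 : (0:Int) ≤ max 0 left := le_max_left _ _
    have hhin : min (length - 1) right < (length.toNat : Int) := by omega
    have hpl : (pvPaint (List.replicate length.toNat "#FFFFF0") (max 0 left) (min (length - 1) right) "#FF1493").length = length.toNat := by
      rw [pvPaint_length _ _ _ _ h0 hph (by rw [hbl]; exact hhin)]; exact hbl
    have hgin : min (min (length - 1) right) middle < ((pvPaint (List.replicate length.toNat "#FFFFF0") (max 0 left) (min (length - 1) right) "#FF1493").length : Int) := by
      rw [hpl]; omega
    apply List.ext_getElem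
    · simp only [List.length_map, List.length_range]
      rw [pvPaint_length _ _ _ _ h0 hg hgin, hpl]
    · intro i h1 h2
      have hin : i < length.toNat := by simpa using h1
      rw [List.getElem_map, List.getElem_range]
      rw [pvPaint_getElem _ _ _ _ h0 hg hgin i (by omega) h2]
      rw [pvPaint_getElem _ _ _ _ h0 hph (by rw [hbl]; exact hhin) i (by omega)
        (by rw [pvPaint_length _ _ _ _ h0 hph (by rw [hbl]; exact hhin)]; omega)]
      rw [List.getElem_replicate]
      split_ifs <;> first | rfl | omega
  · -- pink only
    have h0 : (0:Int) ≤ max 0 left := le_max_left _ _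
    have hhin : min (length - 1) right < (length.toNat : Int) := by omega
    have hpl : (pvPaint (List.replicate length.toNat "#FFFFF0") (max 0 left) (min (length - 1) right) "#FF1493").length = length.toNat := by
      rw [pvPaint_length _ _ _ _ h0 hph (by rw [hbl]; exact hhin)]; exact hbl
    apply List.ext_getElem
    · simp only [List.length_map, List.length_range]; exact hpl.symm
    · intro i h1 h2
      have hin : i < length.toNat := by simpa using h1
      rw [List.getElem_map, List.getElem_range]
      rw [pvPaint_getElem _ _ _ _ h0 hph (by rw [hbl]; exact hhin) i (by omega) h2]
      rw [List.getElem_replicate]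
      split_ifs <;> first | rfl | omega
  · -- empty pink range: everything stays ivory
    apply List.ext_getElem
    · simp
    · intro i h1 h2
      have hin : i < length.toNat := by simpa using h1
      rw [List.getElem_map, List.getElem_range, List.getElem_replicate]
      split_ifs <;> first | rfl | omega
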